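-- pv_equiv track=rewrite | github.com/benquick123/code-profiling | code/batch-2/vse-naloge-brez-testov/DN7-Z-011.py | varen_premik
-- ===== SOURCE A (Python) =====
-- def varen_premik(x0, y0, x1, y1, mine):
--     if (x0, y0) in mine or (x1, y1) in mine:
--         return False
--     if x0 < x1:
--         for x in range(x0, x1):
--             if (x, y1) in mine:
--                 return False
--     else:
--         for x in range(x1, x0):
--             if (x, y1) in mine:
--                 return False
--     if y0 < y1:
--         for y in range(y0, y1):
--             if (x0, y) in mine:
--                 return False
--     else:
--         for y in range(y1, y0):
--             if (x0, y) in mine: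
--                 return False
--     return True
-- ===== SOURCE B (Python) =====
-- def varen_premik(x0, y0, x1, y1, mine):
--     for mx, my in mine:
--         if (mx, my) == (x0, y0) or (mx, my) == (x1, y1):
--             return False
--         if my == y1 and min(x0, x1) <= mx < max(x0, x1):
--             return False
--         if mx == x0 and min(y0, y1) <= my < max(y0, y1):
--             return False
--     return True
-- ===== Notes on version B (the rewrite author's own statement) =====
-- stated objective: faster
-- what changed: B iterates once over the mine list and tests each mine with a closed-form on-path predicate (endpoint equality or membership in a half-open leg range), instead of scanning every cell of both legs and doing a linear membership test per cell.
import Mathlib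
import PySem

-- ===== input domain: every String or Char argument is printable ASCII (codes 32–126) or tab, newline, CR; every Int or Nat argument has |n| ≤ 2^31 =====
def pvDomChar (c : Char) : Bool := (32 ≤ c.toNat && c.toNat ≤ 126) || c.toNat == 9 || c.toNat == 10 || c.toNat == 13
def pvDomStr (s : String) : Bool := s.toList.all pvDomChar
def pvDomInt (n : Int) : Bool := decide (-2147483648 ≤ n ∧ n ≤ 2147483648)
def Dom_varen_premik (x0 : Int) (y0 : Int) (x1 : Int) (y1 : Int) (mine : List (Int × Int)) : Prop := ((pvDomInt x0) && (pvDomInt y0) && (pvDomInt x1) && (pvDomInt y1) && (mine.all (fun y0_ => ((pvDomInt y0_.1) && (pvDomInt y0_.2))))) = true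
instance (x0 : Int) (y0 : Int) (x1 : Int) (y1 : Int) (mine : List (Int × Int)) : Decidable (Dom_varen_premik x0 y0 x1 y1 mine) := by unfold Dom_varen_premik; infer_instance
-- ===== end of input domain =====

-- B scans the mine list once with a closed-form on-path predicate instead of scanning every
-- path cell with a linear membership test each: O(m) instead of O(pathLength * m).

-- ===== PORT A =====
-- literal transliteration of A: endpoint membership tests, then a scan of the horizontal
-- leg (branching on x0 < x1) and of the vertical leg (branching on y0 < y1), each early
-- return rendered as List.any over the same range
def varen_premik (x0 : Int) (y0 : Int) (x1 : Int) (y1 : Int) (mine : List (Int × Int)) : Bool :=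
  if mine.contains (x0, y0) || mine.contains (x1, y1) then false
  else if (if x0 < x1 then (PySem.List.pyRange x0 x1 1).any (fun x => mine.contains (x, y1))
           else (PySem.List.pyRange x1 x0 1).any (fun x => mine.contains (x, y1))) then false
  else if (if y0 < y1 then (PySem.List.pyRange y0 y1 1).any (fun y => mine.contains (x0, y))
           else (PySem.List.pyRange y1 y0 1).any (fun y => mine.contains (x0, y))) then false
  else true

-- ===== PORT B =====
-- B's per-mine predicate: the mine is an endpoint, or lies on the horizontal leg
-- (row y1, x in [min x0 x1, max x0 x1)), or on the vertical leg (column x0,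
-- y in [min y0 y1, max y0 y1))
def pvOnPath (x0 : Int) (y0 : Int) (x1 : Int) (y1 : Int) (p : Int × Int) : Bool :=
  (p == (x0, y0)) || (p == (x1, y1)) ||
  (p.2 == y1 && decide (min x0 x1 ≤ p.1) && decide (p.1 < max x0 x1)) ||
  (p.1 == x0 && decide (min y0 y1 ≤ p.2) && decide (p.2 < max y0 y1))

-- single pass over mine, early-exit loop rendered as List.all
def varen_premik_alt (x0 : Int) (y0 : Int) (x1 : Int) (y1 : Int) (mine : List (Int × Int)) : Bool :=
  mine.all (fun p => !(pvOnPath x0 y0 x1 y1 p))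

-- ===== PRECONDITION & SPEC =====
def Spec_varen_premik (x0 : Int) (y0 : Int) (x1 : Int) (y1 : Int) (mine : List (Int × Int)) (out : Bool) : Prop := out = varen_premik_alt x0 y0 x1 y1 mine
instance (x0 : Int) (y0 : Int) (x1 : Int) (y1 : Int) (mine : List (Int × Int)) (out : Bool) : Decidable (Spec_varen_premik x0 y0 x1 y1 mine out) := by unfold Spec_varen_premik; infer_instance

-- ===== CLAIM (what is proved, stated in full; the proofs are below) =====
def Claim_equal_varen_premik : Prop := ∀ (x0 : Int) (y0 : Int) (x1 : Int) (y1 : Int) (mine : List (Int × Int)), Dom_varen_premik x0 y0 x1 y1 mine → Spec_varen_premik x0 y0 x1 y1 mine (varen_premik x0 y0 x1 y1 mine)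

-- ===== LEMMAS AND PROOFS =====

-- boolean shape of A: three guarded early returns are the negation of a disjunction
theorem pvIf3 (a b c : Bool) :
    (if a then false else if b then false else if c then false else true) = !(a || b || c) := by
  cases a <;> cases b <;> cases c <;> rfl

-- A's leg scan (either branch of the if) holds iff some cell of the half-open
-- range [min a b, max a b) maps to a member of mine
theorem pvScan_iff (a b : Int) (f : Int → Int × Int) (mine : List (Int × Int)) :
    ((if a < b then (PySem.List.pyRange a b 1).any (fun t => mine.contains (f t))
      else (PySem.List.pyRange b a 1).any (fun t => mine.contains (f t))) = true)
    ↔ ∃ t, min a b ≤ t ∧ t < max a b ∧ f t ∈ mine := by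
  split_ifs with h <;>
  · simp only [List.any_eq_true, PySem.List.mem_pyRange_one, List.contains_eq_mem,
      decide_eq_true_eq]
    constructor
    · rintro ⟨t, ⟨h1, h2⟩, h3⟩; exact ⟨t, by omega, by omega, h3⟩
    · rintro ⟨t, h1, h2, h3⟩; exact ⟨t, ⟨by omega, by omega⟩, h3⟩

theorem pvScanH_iff (x0 x1 y1 : Int) (mine : List (Int × Int)) :
    ((if x0 < x1 then (PySem.List.pyRange x0 x1 1).any (fun x => mine.contains (x, y1))
      else (PySem.List.pyRange x1 x0 1).any (fun x => mine.contains (x, y1))) = true)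
    ↔ ∃ t, min x0 x1 ≤ t ∧ t < max x0 x1 ∧ (t, y1) ∈ mine :=
  pvScan_iff x0 x1 (fun t => (t, y1)) mine

theorem pvScanV_iff (x0 y0 y1 : Int) (mine : List (Int × Int)) :
    ((if y0 < y1 then (PySem.List.pyRange y0 y1 1).any (fun y => mine.contains (x0, y))
      else (PySem.List.pyRange y1 y0 1).any (fun y => mine.contains (x0, y))) = true)
    ↔ ∃ t, min y0 y1 ≤ t ∧ t < max y0 y1 ∧ (x0, t) ∈ mine :=
  pvScan_iff y0 y1 (fun t => (x0, t)) mine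

theorem pvOnPath_true_iff (x0 y0 x1 y1 px py : Int) :
    pvOnPath x0 y0 x1 y1 (px, py) = true ↔
      ((px = x0 ∧ py = y0) ∨ (px = x1 ∧ py = y1) ∨
       (py = y1 ∧ min x0 x1 ≤ px ∧ px < max x0 x1) ∨
       (px = x0 ∧ min y0 y1 ≤ py ∧ py < max y0 y1)) := by
  simp [pvOnPath, Prod.ext_iff, and_assoc]; omega

theorem pv_eq (x0 y0 x1 y1 : Int) (mine : List (Int × Int)) :
    varen_premik x0 y0 x1 y1 mine = varen_premik_alt x0 y0 x1 y1 mine := by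
  have hA : varen_premik x0 y0 x1 y1 mine =
      !((mine.contains (x0, y0) || mine.contains (x1, y1)) ||
        (if x0 < x1 then (PySem.List.pyRange x0 x1 1).any (fun x => mine.contains (x, y1))
         else (PySem.List.pyRange x1 x0 1).any (fun x => mine.contains (x, y1))) ||
        (if y0 < y1 then (PySem.List.pyRange y0 y1 1).any (fun y => mine.contains (x0, y))
         else (PySem.List.pyRange y1 y0 1).any (fun y => mine.contains (x0, y)))) := by
    unfold varen_premik; exact pvIf3 _ _ _
  rw [hA, Bool.eq_iff_iff]
  simp only [Bool.not_eq_true', Bool.or_eq_false_iff]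
  rw [Bool.eq_false_iff, Bool.eq_false_iff, Bool.eq_false_iff, Bool.eq_false_iff]
  simp only [ne_eq]
  rw [pvScanH_iff, pvScanV_iff]
  simp only [List.contains_eq_mem, decide_eq_true_eq, varen_premik_alt, List.all_eq_true,
    Bool.not_eq_true']
  constructor
  · rintro ⟨⟨⟨h1, h2⟩, h3⟩, h4⟩ p hp
    obtain ⟨px, py⟩ := p
    rw [Bool.eq_false_iff, ne_eq, pvOnPath_true_iff]
    rintro (⟨hx, hy⟩ | ⟨hx, hy⟩ | ⟨hy, hlo, hhi⟩ | ⟨hx, hlo, hhi⟩)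
    · exact h1 (by rw [← hx, ← hy]; exact hp)
    · exact h2 (by rw [← hx, ← hy]; exact hp)
    · exact h3 ⟨px, hlo, hhi, by rw [← hy]; exact hp⟩
    · exact h4 ⟨py, hlo, hhi, by rw [← hx]; exact hp⟩
  · intro hall
    refine ⟨⟨⟨fun h => ?_, fun h => ?_⟩, fun h => ?_⟩, fun h => ?_⟩
    · have := hall _ h
      rw [Bool.eq_false_iff, ne_eq, pvOnPath_true_iff] at this
      exact this (Or.inl ⟨rfl, rfl⟩)
    · have := hall _ h
      rw [Bool.eq_false_iff, ne_eq, pvOnPath_true_iff] at this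
      exact this (Or.inr (Or.inl ⟨rfl, rfl⟩))
    · obtain ⟨t, hlo, hhi, hm⟩ := h
      have := hall _ hm
      rw [Bool.eq_false_iff, ne_eq, pvOnPath_true_iff] at this
      exact this (Or.inr (Or.inr (Or.inl ⟨rfl, hlo, hhi⟩)))
    · obtain ⟨t, hlo, hhi, hm⟩ := h
      have := hall _ hm
      rw [Bool.eq_false_iff, ne_eq, pvOnPath_true_iff] at this
      exact this (Or.inr (Or.inr (Or.inr ⟨rfl, hlo, hhi⟩)))

-- ===== VERDICT (by name: the statement is the Claim_ definition above) =====
theorem varen_premik_spec : Claim_equal_varen_premik := by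
  intro x0 y0 x1 y1 mine _
  unfold Spec_varen_premik
  exact pv_eq x0 y0 x1 y1 mine
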